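-- pv_equiv track=rewrite | github.com/sshbsshb/daqGuiii | main.py | transform_for_step_plot
-- ===== SOURCE A (Python) =====
-- def transform_for_step_plot(schedule_data):
--     """
--     Transform schedule data for a hold-last-value (step) curve.
--     Each point is duplicated with the next point's timestamp to create a step effect.
--     """
--     step_data = []
--     for i, (time, value) in enumerate(schedule_data):
--         if i < len(schedule_data) - 1:
--             # Duplicate the current point with the next point's timestamp
--             next_time = schedule_data[i + 1][0]
--             step_data.append((time, value))
--             step_data.append((next_time, value))
--         else:
--             # Last point, just append
--             step_data.append((time, value))
--     return step_data
-- ===== SOURCE B (Python) =====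
-- def transform_for_step_plot(schedule_data):
--     """
--     Transform schedule data for a hold-last-value (step) curve.
--     Axis decomposition: expand the time axis (first time once, every later
--     time doubled) and the value axis (every value but the last doubled,
--     last one once) independently, then zip the two axes back into points.
--     """
--     if not schedule_data:
--         return []
--     times = [t for t, _ in schedule_data]
--     values = [v for _, v in schedule_data]
--     step_times = [times[0]] + [t for t in times[1:] for _ in (0, 1)]
--     step_values = [v for v in values[:-1] for _ in (0, 1)] + [values[-1]]
--     return list(zip(step_times, step_values))
-- ===== Notes on version B (the rewrite author's own statement) =====
-- stated objective: alternative
-- what changed: Instead of one loop with index look-ahead emitting point pairs, B decomposes by axis: it builds the expanded time list (first time once, later times doubled) and the expanded value list (all but last doubled, last once) in separate passes and zips them back into points.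
import Mathlib
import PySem

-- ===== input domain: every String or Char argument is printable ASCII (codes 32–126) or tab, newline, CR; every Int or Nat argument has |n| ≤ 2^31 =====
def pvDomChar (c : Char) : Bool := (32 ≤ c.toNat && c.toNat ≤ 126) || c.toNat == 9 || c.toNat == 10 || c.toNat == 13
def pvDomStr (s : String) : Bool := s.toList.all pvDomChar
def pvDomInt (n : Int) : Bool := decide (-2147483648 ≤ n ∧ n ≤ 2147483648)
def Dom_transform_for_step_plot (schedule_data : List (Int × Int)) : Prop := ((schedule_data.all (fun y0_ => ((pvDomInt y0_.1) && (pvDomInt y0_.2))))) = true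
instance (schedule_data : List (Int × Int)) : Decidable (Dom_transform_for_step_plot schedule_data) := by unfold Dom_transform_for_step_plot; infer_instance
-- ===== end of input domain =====

-- B replaces A's indexed look-ahead loop with an axis decomposition (expand times and values separately, then zip); alternative structure, same O(n) cost.


-- ===== PORT A =====
-- schedule_data[i+1] is always in range when the branch is taken, so pyGetD's default is never used.
def transform_for_step_plot (schedule_data : List (Int × Int)) : List (Int × Int) :=
  (PySem.List.enumerate schedule_data).foldl
    (fun step_data p =>
      if p.1 < (schedule_data.length : Int) - 1 then
        let next_time := (PySem.List.pyGetD schedule_data (p.1 + 1) (0, 0)).1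
        step_data ++ [(p.2.1, p.2.2)] ++ [(next_time, p.2.2)]
      else
        step_data ++ [(p.2.1, p.2.2)]) []

-- ===== PORT B =====
-- times[1:] → .tail, values[:-1] → .dropLast; the comprehensions 'for _ in (0,1)' double each element (flatMap fun x => [x, x]).
def transform_for_step_plot_alt (schedule_data : List (Int × Int)) : List (Int × Int) :=
  match schedule_data with
  | [] => []
  | _ :: _ =>
    let times := schedule_data.map (·.1)
    let values := schedule_data.map (·.2)
    let step_times := [times.head!] ++ times.tail.flatMap (fun t => [t, t])
    let step_values := values.dropLast.flatMap (fun v => [v, v]) ++ [values.getLast!]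
    step_times.zip step_values

-- ===== PRECONDITION & SPEC =====
def Spec_transform_for_step_plot (schedule_data : List (Int × Int)) (out : List (Int × Int)) : Prop := out = transform_for_step_plot_alt schedule_data
instance (schedule_data : List (Int × Int)) (out : List (Int × Int)) : Decidable (Spec_transform_for_step_plot schedule_data out) := by unfold Spec_transform_for_step_plot; infer_instance

-- ===== CLAIM (what is proved, stated in full; the proofs are below) =====
def Claim_equal_transform_for_step_plot : Prop := ∀ (schedule_data : List (Int × Int)), Dom_transform_for_step_plot schedule_data → Spec_transform_for_step_plot schedule_data (transform_for_step_plot schedule_data)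

-- ===== LEMMAS AND PROOFS =====

-- canonical form: step-expansion of the tail, given the previous point
def pvTailFlat : (Int × Int) → List (Int × Int) → List (Int × Int)
  | _, [] => []
  | p, q :: rest => (q.1, p.2) :: (q.1, q.2) :: pvTailFlat q rest

-- canonical form of A's per-element contribution
def pvConv : List (Int × Int) → List (Int × Int)
  | [] => []
  | x :: rest =>
    (match rest with
     | [] => [x]
     | y :: _ => [x, (y.1, x.2)]) ++ pvConv rest

theorem pvA_aux (suf : List (Int × Int)) : ∀ (pre acc : List (Int × Int)),
    (PySem.List.enumerate suf (pre.length : Int)).foldl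
      (fun step_data p =>
        if p.1 < ((pre ++ suf).length : Int) - 1 then
          let next_time := (PySem.List.pyGetD (pre ++ suf) (p.1 + 1) (0, 0)).1
          step_data ++ [(p.2.1, p.2.2)] ++ [(next_time, p.2.2)]
        else
          step_data ++ [(p.2.1, p.2.2)]) acc
      = acc ++ pvConv suf := by
  induction suf with
  | nil => intro pre acc; simp [PySem.List.enumerate, pvConv]
  | cons x rest ih =>
    intro pre acc
    rw [PySem.List.enumerate_cons, List.foldl_cons]
    have hpre : ((pre ++ [x]).length : Int) = (pre.length : Int) + 1 := by simp
    have hlist : (pre ++ [x]) ++ rest = pre ++ x :: rest := by simp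
    have := ih (pre ++ [x])
    rw [hpre, hlist] at this
    rw [this]
    cases rest with
    | nil =>
      have hcond : ¬ ((pre.length : Int) < ((pre ++ [x]).length : Int) - 1) := by
        simp
      simp only [hcond, if_false, pvConv]
      simp
    | cons y r =>
      have hcond : (pre.length : Int) < ((pre ++ x :: y :: r).length : Int) - 1 := by
        simp; omega
      have hget : PySem.List.pyGetD (pre ++ x :: y :: r) ((pre.length : Int) + 1) (0, 0) = y := by
        have : ((pre.length : Int) + 1) = ((pre.length + 1 : Nat) : Int) := by push_cast; ring
        rw [this, PySem.List.pyGetD_natCast]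
        rw [List.getD_eq_getElem?_getD, List.getElem?_append_right (by omega)]
        simp
      simp only [hcond, if_true, hget, pvConv]
      simp

theorem pvA_eq_conv (sd : List (Int × Int)) : transform_for_step_plot sd = pvConv sd := by
  have := pvA_aux sd [] []
  simpa [transform_for_step_plot, PySem.List.enumerate] using this

theorem pvConv_eq_tailFlat : ∀ (x : Int × Int) (rest : List (Int × Int)),
    pvConv (x :: rest) = x :: pvTailFlat x rest := by
  intro x rest
  induction rest generalizing x with
  | nil => simp [pvConv, pvTailFlat]
  | cons y r ih =>
    have h1 : pvConv (x :: y :: r) = [x, (y.1, x.2)] ++ pvConv (y :: r) := rfl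
    rw [h1, ih y]
    simp [pvTailFlat]

theorem pvB_aux : ∀ (x : Int × Int) (rest : List (Int × Int)),
    ((x.1 :: (rest.map (·.1)).flatMap (fun t => [t, t])).zip
      ((((x :: rest).map (·.2)).dropLast.flatMap (fun v => [v, v])) ++ [((x :: rest).map (·.2)).getLast!]))
      = x :: pvTailFlat x rest := by
  intro x rest
  induction rest generalizing x with
  | nil => simp [pvTailFlat]
  | cons y r ih =>
    have hdrop : ((x :: y :: r).map (·.2)).dropLast = x.2 :: ((y :: r).map (·.2)).dropLast := by
      simp
    have hlast : ((x :: y :: r).map (·.2)).getLast! = ((y :: r).map (·.2)).getLast! := by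
      simp [List.getLast!]
    rw [hdrop, hlast]
    simp only [List.map_cons, List.flatMap_cons, List.cons_append, List.nil_append, List.zip_cons_cons, pvTailFlat]
    have := ih y
    simp only [List.map_cons] at this ⊢
    rw [this]

-- ===== VERDICT (by name: the statement is the Claim_ definition above) =====
theorem transform_for_step_plot_spec : Claim_equal_transform_for_step_plot := by
  intro sd _
  unfold Spec_transform_for_step_plot
  rw [pvA_eq_conv]
  cases sd with
  | nil => rfl
  | cons x rest =>
    rw [pvConv_eq_tailFlat]
    rw [show transform_for_step_plot_alt (x :: rest)
        = ((x.1 :: (rest.map (·.1)).flatMap (fun t => [t, t])).zip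
            ((((x :: rest).map (·.2)).dropLast.flatMap (fun v => [v, v])) ++ [((x :: rest).map (·.2)).getLast!]))
      from by simp [transform_for_step_plot_alt]]
    rw [pvB_aux]
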